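-- pv_equiv track=rewrite | github.com/spia-bench/SPIA-benchmark | src/baseline/adversarial_anonymizer/anonymizer_panorama.py | _find_closest_attribute
-- ===== SOURCE A (Python) =====
-- from typing import Optional, Dict, Any, List
--
-- def _find_closest_attribute(value: str, target_attributes: List[str]) -> str:
--     """
--     Find the closest matching attribute from target_attributes.
--
--     Simple matching based on lowercase comparison and substring matching.
--     For more sophisticated matching, consider using fuzzy string matching libraries.
--
--     Args:
--         value: The value to match
--         target_attributes: List of valid attributes
--
--     Returns:
--         The closest matching attribute or the original value
--     """
--     value_lower = value.lower().strip()
--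
--     # Exact match
--     for attr in target_attributes:
--         if attr.lower() == value_lower:
--             return attr
--
--     # Substring match
--     for attr in target_attributes:
--         if value_lower in attr.lower() or attr.lower() in value_lower:
--             return attr
--
--     # Return the original value if no match found
--     return value
-- ===== SOURCE B (Python) =====
-- def _find_closest_attribute(value, target_attributes):
--     """Single pass: remember the first exact and first substring match, decide at the end."""
--     value_lower = value.lower().strip()
--     first_exact = None
--     first_substring = None
--     for attr in target_attributes:
--         attr_lower = attr.lower()
--         if first_exact is None and attr_lower == value_lower:
--             first_exact = attr
--         if first_substring is None and (value_lower in attr_lower or attr_lower in value_lower):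
--             first_substring = attr
--     if first_exact is not None:
--         return first_exact
--     if first_substring is not None:
--         return first_substring
--     return value
-- ===== Notes on version B (the rewrite author's own statement) =====
-- stated objective: alternative
-- what changed: Replaces A's two sequential scans (exact-match pass, then substring pass) with one single pass that records the first exact and first substring match in two state variables and decides after the loop.
import Mathlib
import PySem

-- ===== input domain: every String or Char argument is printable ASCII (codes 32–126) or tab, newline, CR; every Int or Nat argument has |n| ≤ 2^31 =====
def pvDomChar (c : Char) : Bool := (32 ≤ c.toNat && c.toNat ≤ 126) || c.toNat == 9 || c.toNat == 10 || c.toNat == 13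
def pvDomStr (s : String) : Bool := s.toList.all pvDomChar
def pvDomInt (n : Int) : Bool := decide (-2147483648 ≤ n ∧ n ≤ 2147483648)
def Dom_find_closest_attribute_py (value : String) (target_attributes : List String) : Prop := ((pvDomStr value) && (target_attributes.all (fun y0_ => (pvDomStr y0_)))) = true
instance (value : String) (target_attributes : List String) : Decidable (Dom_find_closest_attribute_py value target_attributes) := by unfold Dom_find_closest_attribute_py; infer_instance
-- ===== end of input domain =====

-- B is an alternative one-pass decomposition of A's two scans; same values, same cost.

-- ===== PORT A =====
-- first `for` loop of A: return the first attr with attr.lower() == value_lower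
def pvFindExactA (vl : String) : List String → Option String
  | [] => none
  | a :: rest => if PySem.Str.lower a == vl then some a else pvFindExactA vl rest

-- second `for` loop of A: first attr with value_lower in attr.lower() or attr.lower() in value_lower
def pvFindSubA (vl : String) : List String → Option String
  | [] => none
  | a :: rest =>
      if PySem.Str.isIn vl (PySem.Str.lower a) || PySem.Str.isIn (PySem.Str.lower a) vl then some a
      else pvFindSubA vl rest

def find_closest_attribute_py (value : String) (target_attributes : List String) : String :=
  let value_lower := PySem.Str.strip (PySem.Str.lower value)
  match pvFindExactA value_lower target_attributes with
  | some a => a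
  | none =>
    match pvFindSubA value_lower target_attributes with
    | some a => a
    | none => value

-- ===== PORT B =====
-- B's single loop: carry (first_exact, first_substring), each set at most once
def pvScanB (vl : String) : List String → Option String × Option String → Option String × Option String
  | [], st => st
  | a :: rest, (fe, fs) =>
      let al := PySem.Str.lower a
      let fe' := if fe.isNone && (al == vl) then some a else fe
      let fs' := if fs.isNone && (PySem.Str.isIn vl al || PySem.Str.isIn al vl) then some a else fs
      pvScanB vl rest (fe', fs')

def find_closest_attribute_py_alt (value : String) (target_attributes : List String) : String :=
  let value_lower := PySem.Str.strip (PySem.Str.lower value)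
  let st := pvScanB value_lower target_attributes (none, none)
  match st.1 with
  | some a => a
  | none =>
    match st.2 with
    | some a => a
    | none => value

-- ===== PRECONDITION & SPEC =====
def Spec_find_closest_attribute_py (value : String) (target_attributes : List String) (out : String) : Prop := out = find_closest_attribute_py_alt value target_attributes
instance (value : String) (target_attributes : List String) (out : String) : Decidable (Spec_find_closest_attribute_py value target_attributes out) := by unfold Spec_find_closest_attribute_py; infer_instance

-- ===== CLAIM (what is proved, stated in full; the proofs are below) =====
def Claim_equal_find_closest_attribute_py : Prop := ∀ (value : String) (target_attributes : List String), Dom_find_closest_attribute_py value target_attributes → Spec_find_closest_attribute_py value target_attributes (find_closest_attribute_py value target_attributes)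

-- ===== LEMMAS AND PROOFS =====

-- B's fold state decomposes componentwise into A's two scans
theorem pvScanB_eq (vl : String) (l : List String) (fe fs : Option String) :
    pvScanB vl l (fe, fs) = (fe.or (pvFindExactA vl l), fs.or (pvFindSubA vl l)) := by
  induction l generalizing fe fs with
  | nil => simp [pvScanB, pvFindExactA, pvFindSubA]
  | cons a rest ih =>
      simp only [pvScanB, pvFindExactA, pvFindSubA]
      cases fe <;> cases fs <;>
        simp only [Option.isNone, Bool.true_and, Bool.false_and, ih, Option.or] <;>
        first
          | rfl
          | (split_ifs <;> simp_all [Option.or])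

-- ===== VERDICT (by name: the statement is the Claim_ definition above) =====
theorem find_closest_attribute_py_spec : Claim_equal_find_closest_attribute_py := by
  intro value tas _
  unfold Spec_find_closest_attribute_py find_closest_attribute_py find_closest_attribute_py_alt
  simp only [pvScanB_eq, Option.or]
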